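-- pv_equiv track=rewrite | github.com/knitty-kim/ProgrammersSolvingCode | 프로그래머스/2/70129. 이진 변환 반복하기/이진 변환 반복하기.py | solution
-- ===== SOURCE A (Python) =====
-- def solution(s):
--     count_bin = 0
--     count_zero = 0
--
--     answer = [0, 0]
--
--     while True:
--         if s == '1':
--             break
--         temp = ''
--         for i in range(len(s)):
--             if s[i] == '0':
--                 count_zero += 1
--             else:
--                 temp += s[i]
--         s = format(len(temp), 'b')
--         count_bin += 1
--
--
--     answer[0] = count_bin
--     answer[1] = count_zero
--
--     return answer
-- ===== SOURCE B (Python) =====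
-- def solution(s):
--     if s == '1':
--         return [0, 0]
--     ones = sum(1 for c in s if c != '0')
--     count_bin = 1
--     count_zero = len(s) - ones
--     n = ones
--     while n != 1:
--         count_bin += 1
--         count_zero += n.bit_length() - n.bit_count()
--         n = n.bit_count()
--     return [count_bin, count_zero]
-- ===== Notes on version B (the rewrite author's own statement) =====
-- stated objective: faster
-- what changed: After one counting pass over the input string the evolving state is a machine integer updated with bit_length/bit_count, instead of building and rescanning a new binary string every round.
import Mathlib
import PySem

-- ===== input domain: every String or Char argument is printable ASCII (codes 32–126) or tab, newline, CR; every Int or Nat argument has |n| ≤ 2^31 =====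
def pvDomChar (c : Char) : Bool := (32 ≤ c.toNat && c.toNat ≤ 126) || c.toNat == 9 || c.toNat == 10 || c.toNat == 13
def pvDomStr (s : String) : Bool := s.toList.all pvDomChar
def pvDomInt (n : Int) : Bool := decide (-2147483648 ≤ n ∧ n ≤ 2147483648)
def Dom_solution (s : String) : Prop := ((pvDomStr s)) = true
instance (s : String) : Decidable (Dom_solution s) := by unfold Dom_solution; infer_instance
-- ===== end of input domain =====

-- B replaces A's repeated string building/rescanning by an integer state with
-- bit_length/bit_count after the first round (idiomatic; same asymptotic cost).

-- ===== PORT A =====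
-- A's while-loop, fuel-bounded; the fuel is never exhausted on inputs satisfying
-- Pre_solution (the loop lemma below shows (length + 64) steps always suffice there).
def solutionLoop : Nat → String → Int → Int → Int × Int
  | 0, _, count_bin, count_zero => (count_bin, count_zero)
  | f + 1, s, count_bin, count_zero =>
    if s = "1" then (count_bin, count_zero)
    else
      -- for i in range(len(s)): count zeros / append non-'0' chars to temp
      let st := s.toList.foldl
        (fun (acc : Int × List Char) c =>
          if c = '0' then (acc.1 + 1, acc.2) else (acc.1, acc.2 ++ [c]))
        (count_zero, [])
      solutionLoop f (PySem.Int.toBin (st.2.length : Int)) (count_bin + 1) st.1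

def solution (s : String) : List Int :=
  let r := solutionLoop (s.toList.length + 64) s 0 0
  [r.1, r.2]

-- ===== PORT B =====
-- B's integer while-loop, fuel-bounded; fuel (n + 1) is never exhausted for n ≥ 1.
def altLoop : Nat → Nat → Int → Int → Int × Int
  | 0, _, count_bin, count_zero => (count_bin, count_zero)
  | f + 1, n, count_bin, count_zero =>
    if n = 1 then (count_bin, count_zero)
    else
      altLoop f (PySem.Int.bitCount (n : Int)) (count_bin + 1)
        (count_zero + ((PySem.Int.bitLength (n : Int) : Int) - (PySem.Int.bitCount (n : Int) : Int)))

def solution_alt (s : String) : List Int :=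
  if s = "1" then [0, 0]
  else
    let ones := (s.toList.filter (fun c => c != '0')).length
    let r := altLoop (ones + 1) ones 1 ((s.toList.length : Int) - (ones : Int))
    [r.1, r.2]

-- ===== PRECONDITION & SPEC =====
-- Pre_ excludes exactly the inputs on which A never returns (it loops forever):
-- strings other than "1" consisting entirely of '0' characters (including "").
def Pre_solution (s : String) : Prop := s = "1" ∨ (s.toList.any (fun c => c != '0')) = true
instance (s : String) : Decidable (Pre_solution s) := by unfold Pre_solution; infer_instance

def pvWitness_solution : String := "110"

def Spec_solution (s : String) (out : List Int) : Prop := out = solution_alt s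
instance (s : String) (out : List Int) : Decidable (Spec_solution s out) := by unfold Spec_solution; infer_instance

-- ===== CLAIM (what is proved, stated in full; the proofs are below) =====
def Claim_equal_solution : Prop := ∀ (s : String), Dom_solution s → Pre_solution s → Spec_solution s (solution s)

-- ===== LEMMAS AND PROOFS =====

-- binary digits of n (most significant first; [] for n = 0)
def myBits (n : Nat) : List Char :=
  if h : n = 0 then [] else myBits (n / 2) ++ [Nat.digitChar (n % 2)]
  decreasing_by exact Nat.div_lt_self (Nat.pos_of_ne_zero h) one_lt_two

lemma myBits_zero : myBits 0 = [] := by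
  rw [myBits]
  simp

lemma myBits_pos (m : Nat) (h : m ≠ 0) :
    myBits m = myBits (m / 2) ++ [Nat.digitChar (m % 2)] := by
  rw [myBits, dif_neg h]

lemma toDigitsCore_eq_myBits : ∀ (f n : Nat) (ds : List Char), 0 < n → n < 2 ^ f →
    Nat.toDigitsCore 2 f n ds = myBits n ++ ds := by
  intro f
  induction f with
  | zero => intro n ds h1 h2; omega
  | succ f ih =>
    intro n ds h1 h2
    rw [Nat.toDigitsCore]
    by_cases hh : n / 2 = 0
    · have hn1 : n = 1 := by omega
      subst hn1
      rw [myBits_pos 1 (by omega), myBits_zero]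
      simp
    · simp only [hh, if_false]
      rw [ih (n / 2) _ (Nat.pos_of_ne_zero hh) (by omega), myBits_pos n (by omega)]
      simp

lemma toBinChars_eq_myBits (m : Nat) (h : 0 < m) :
    PySem.Int.toBinChars (m : Int) = myBits m := by
  have hn : ¬ ((m : Int) < 0) := by omega
  simp only [PySem.Int.toBinChars, hn, if_false, Int.toNat_natCast]
  rw [Nat.toDigits, toDigitsCore_eq_myBits (m + 1) m [] h (by
    calc m < m + 1 := Nat.lt_succ_self m
    _ ≤ 2 ^ (m + 1) := Nat.le_of_lt (Nat.lt_two_pow_self))]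
  simp

lemma length_myBits : ∀ m : Nat, (myBits m).length = PySem.Int.bitLength (m : Int) := by
  intro m
  induction m using Nat.strong_induction_on with
  | _ m ih =>
    by_cases h0 : m = 0
    · subst h0; simp [myBits_zero, PySem.Int.bitLength_zero]
    · rw [myBits_pos m h0, List.length_append,
        ih (m / 2) (Nat.div_lt_self (Nat.pos_of_ne_zero h0) one_lt_two),
        PySem.Int.bitLength_natCast (Nat.pos_of_ne_zero h0)]
      simp

lemma ones_myBits : ∀ m : Nat,
    ((myBits m).filter (fun c => c != '0')).length = PySem.Int.bitCount (m : Int) := by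
  intro m
  induction m using Nat.strong_induction_on with
  | _ m ih =>
    by_cases h0 : m = 0
    · subst h0; simp [myBits_zero, PySem.Int.bitCount_zero]
    · rw [myBits_pos m h0, List.filter_append, List.length_append,
        ih (m / 2) (Nat.div_lt_self (Nat.pos_of_ne_zero h0) one_lt_two),
        PySem.Int.bitCount_natCast (Nat.pos_of_ne_zero h0)]
      rcases Nat.mod_two_eq_zero_or_one m with h2 | h2 <;>
        simp [h2, Nat.digitChar]
      omega

lemma countP_filter_split (l : List Char) :
    l.countP (fun c => c == '0') + (l.filter (fun c => c != '0')).length = l.length := by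
  induction l with
  | nil => rfl
  | cons c t ih =>
    by_cases hc : c = '0' <;>
      simp [hc] <;> omega

lemma zeros_myBits (m : Nat) :
    ((myBits m).countP (fun c => c == '0') : Int)
      = (PySem.Int.bitLength (m : Int) : Int) - (PySem.Int.bitCount (m : Int) : Int) := by
  have h1 := countP_filter_split (myBits m)
  rw [ones_myBits m, length_myBits m] at h1
  omega

lemma myBits_ne_nil (m : Nat) (h : 0 < m) : myBits m ≠ [] := by
  rw [myBits_pos m (by omega)]
  simp

lemma myBits_eq_one_iff (m : Nat) : myBits m = ['1'] ↔ m = 1 := by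
  constructor
  · intro h
    by_cases h0 : m = 0
    · subst h0; simp [myBits] at h
    · by_contra hne
      have h2 : 2 ≤ m := by omega
      rw [myBits_pos m h0] at h
      have hlen := congrArg List.length h
      simp at hlen
      exact myBits_ne_nil (m / 2) (by omega) hlen
  · intro h; subst h
    rw [myBits_pos 1 (by omega), myBits_zero]
    rfl

lemma toBin_eq_one_iff (m : Nat) (h : 0 < m) :
    PySem.Int.toBin (m : Int) = "1" ↔ m = 1 := by
  constructor
  · intro he
    have := congrArg String.toList he
    rw [PySem.Int.toList_toBin, toBinChars_eq_myBits m h] at this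
    exact (myBits_eq_one_iff m).mp (by simpa using this)
  · intro h1; subst h1; decide

lemma foldA (l : List Char) : ∀ (cz : Int) (acc : List Char),
    l.foldl (fun (acc : Int × List Char) c =>
        if c = '0' then (acc.1 + 1, acc.2) else (acc.1, acc.2 ++ [c])) (cz, acc)
      = (cz + (l.countP (fun c => c == '0') : Int), acc ++ l.filter (fun c => c != '0')) := by
  induction l with
  | nil => intro cz acc; simp
  | cons c t ih =>
    intro cz acc
    by_cases hc : c = '0'
    · simp [hc, List.foldl_cons, ih]
      ring
    · simp [List.foldl_cons, hc, ih, bne_iff_ne]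

lemma bitCount_pos (m : Nat) (h : 0 < m) : 0 < PySem.Int.bitCount (m : Int) := by
  induction m using Nat.strong_induction_on with
  | _ m ih =>
    rw [PySem.Int.bitCount_natCast h]
    rcases Nat.mod_two_eq_zero_or_one m with h2 | h2
    · have := ih (m / 2) (Nat.div_lt_self h one_lt_two) (by omega)
      omega
    · omega

lemma bitCount_le (m : Nat) : PySem.Int.bitCount (m : Int) ≤ m := by
  induction m using Nat.strong_induction_on with
  | _ m ih =>
    by_cases h0 : m = 0
    · subst h0; simp [PySem.Int.bitCount_zero]
    · rw [PySem.Int.bitCount_natCast (Nat.pos_of_ne_zero h0)]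
      have := ih (m / 2) (Nat.div_lt_self (Nat.pos_of_ne_zero h0) one_lt_two)
      omega

lemma bitCount_lt (m : Nat) (h : 2 ≤ m) : PySem.Int.bitCount (m : Int) < m := by
  rw [PySem.Int.bitCount_natCast (show 0 < m by omega)]
  have := bitCount_le (m / 2)
  omega

lemma loopEq : ∀ n : Nat, 1 ≤ n → ∀ f g : Nat, n + 1 ≤ f → n + 1 ≤ g → ∀ cb cz : Int,
    solutionLoop f (PySem.Int.toBin (n : Int)) cb cz = altLoop g n cb cz := by
  intro n
  induction n using Nat.strong_induction_on with
  | _ n ih =>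
    intro h1 f g hf hg cb cz
    obtain ⟨f', rfl⟩ : ∃ f', f = f' + 1 := ⟨f - 1, by omega⟩
    obtain ⟨g', rfl⟩ : ∃ g', g = g' + 1 := ⟨g - 1, by omega⟩
    by_cases hn1 : n = 1
    · subst hn1
      rw [solutionLoop, altLoop,
        if_pos ((toBin_eq_one_iff 1 one_pos).mpr rfl), if_pos rfl]
    · have h2 : 2 ≤ n := by omega
      rw [solutionLoop, altLoop]
      rw [if_neg (fun he => hn1 ((toBin_eq_one_iff n (by omega)).mp he)),
        if_neg (by exact_mod_cast hn1)]
      have htl : (PySem.Int.toBin (n : Int)).toList = myBits n := by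
        rw [PySem.Int.toList_toBin, toBinChars_eq_myBits n (by omega)]
      rw [htl, foldA]
      simp only [List.nil_append]
      have hones : ((myBits n).filter (fun c => c != '0')).length = PySem.Int.bitCount (n : Int) :=
        ones_myBits n
      rw [hones, zeros_myBits n]
      have hpos := bitCount_pos n (by omega)
      have hlt := bitCount_lt n h2
      exact ih (PySem.Int.bitCount (n : Int)) hlt hpos f' g' (by omega) (by omega) (cb + 1) _

-- ===== VERDICT (by name: the statement is the Claim_ definition above) =====
theorem solution_spec : Claim_equal_solution := by
  intro s _ hpre
  unfold Spec_solution
  by_cases hs : s = "1"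
  · subst hs; decide
  · have hex : ∃ c ∈ s.toList, (c != '0') = true := by
      rcases hpre with h | h
      · exact absurd h hs
      · exact List.any_eq_true.mp h
    have hones : 0 < (s.toList.filter (fun c => c != '0')).length := by
      rcases hex with ⟨c, hc, hcne⟩
      exact List.length_pos_iff.mpr (List.ne_nil_of_mem (List.mem_filter.mpr ⟨hc, hcne⟩))
    have hle : (s.toList.filter (fun c => c != '0')).length ≤ s.toList.length :=
      List.length_filter_le _ _
    unfold solution solution_alt
    rw [if_neg hs]
    obtain ⟨F, hF⟩ : ∃ F, s.toList.length + 64 = F + 1 := ⟨s.toList.length + 63, rfl⟩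
    rw [hF, solutionLoop, if_neg hs, foldA]
    simp only [List.nil_append]
    rw [loopEq ((s.toList.filter (fun c => c != '0')).length) hones F
      ((s.toList.filter (fun c => c != '0')).length + 1) (by omega) (le_refl _)]
    have hsplit := countP_filter_split s.toList
    have : (0 : Int) + (s.toList.countP (fun c => c == '0') : Int)
        = (s.toList.length : Int) - ((s.toList.filter (fun c => c != '0')).length : Int) := by
      omega
    rw [this]
    norm_num
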